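-- pv_equiv track=rewrite | github.com/fuuu555/RFM | data_layer/pipeline.py | _primary_stages_completed
-- ===== SOURCE A (Python) =====
-- from typing import Dict, List, Union
--
-- def _primary_stages_completed(results: List[Dict], num_stages: int = 7) -> bool:
--     expected = {f"Stage {idx}" for idx in range(1, num_stages + 1)}
--     completed = {
--         res["stage"]: res
--         for res in results
--         if res.get("stage") in expected
--     }
--     if len(completed) != len(expected):
--         return False
--     return all(res.get("status") == "ok" for res in completed.values())
-- ===== SOURCE B (Python) =====
-- def _primary_stages_completed(results, num_stages=7):
--     # No dict at all: for each required stage, reverse-scan the results for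
--     # its last occurrence and check that record's status.
--     for i in range(1, num_stages + 1):
--         needed = f"Stage {i}"
--         for res in reversed(results):
--             if res.get("stage") == needed:
--                 if res.get("status") != "ok":
--                     return False
--                 break
--         else:
--             return False
--     return True
-- ===== Notes on version B (the rewrite author's own statement) =====
-- stated objective: alternative
-- what changed: B builds no set and no dict: for each required stage it does a direct reverse linear scan of results for the last matching record and checks its status, replacing A's expected-set/completed-dict/length-count invariant with nested scans.
import Mathlib
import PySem

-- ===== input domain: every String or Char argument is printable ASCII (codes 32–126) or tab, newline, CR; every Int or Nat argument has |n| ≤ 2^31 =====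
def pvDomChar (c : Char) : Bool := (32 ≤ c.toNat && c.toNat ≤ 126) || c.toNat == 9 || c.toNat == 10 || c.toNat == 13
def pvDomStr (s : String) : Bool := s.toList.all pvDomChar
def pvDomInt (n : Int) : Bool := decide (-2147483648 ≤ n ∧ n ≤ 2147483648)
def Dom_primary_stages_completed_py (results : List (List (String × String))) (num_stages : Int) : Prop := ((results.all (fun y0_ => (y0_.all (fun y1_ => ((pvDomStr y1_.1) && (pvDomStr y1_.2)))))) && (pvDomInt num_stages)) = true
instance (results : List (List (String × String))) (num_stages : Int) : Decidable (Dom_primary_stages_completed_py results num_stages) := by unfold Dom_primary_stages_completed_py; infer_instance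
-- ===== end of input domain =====

-- B builds no set and no dict: per required stage it reverse-scans results for the last matching record and checks its status (objective: alternative).

-- shared accessor: Python `res.get(k)` on an input dict given as an association list
def pvDGet (res : List (String × String)) (k : String) : Option String :=
  (PySem.Dict.ofList res).get? k

-- ===== PORT A =====
def pvExpectedA (num_stages : Int) : PySem.Set String :=
  (PySem.List.pyRange 1 (num_stages + 1) 1).foldl
    (fun s i => PySem.Set.add s ("Stage " ++ PySem.Int.toStr i)) PySem.Set.empty

def pvCompletedA (results : List (List (String × String))) (expected : PySem.Set String) :
    PySem.Dict String (List (String × String)) :=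
  results.foldl (fun d res =>
    match pvDGet res "stage" with
    | some s => if PySem.Set.contains expected s then d.insert s res else d
    | none => d) PySem.Dict.empty

def primary_stages_completed_py (results : List (List (String × String))) (num_stages : Int) : Bool :=
  let expected := pvExpectedA num_stages
  let completed := pvCompletedA results expected
  if PySem.Dict.size completed ≠ expected.length then false
  else completed.values.all (fun res => pvDGet res "status" == some "ok")

-- ===== PORT B =====
-- inner `for res in reversed(results): … break / else:` = first match in the reversed list
def primary_stages_completed_py_alt (results : List (List (String × String))) (num_stages : Int) : Bool :=
  (PySem.List.pyRange 1 (num_stages + 1) 1).all (fun i =>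
    let needed := "Stage " ++ PySem.Int.toStr i
    match results.reverse.find? (fun res => pvDGet res "stage" == some needed) with
    | some r => pvDGet r "status" == some "ok"
    | none => false)

-- ===== PRECONDITION & SPEC =====
def Spec_primary_stages_completed_py (results : List (List (String × String))) (num_stages : Int) (out : Bool) : Prop := out = primary_stages_completed_py_alt results num_stages
instance (results : List (List (String × String))) (num_stages : Int) (out : Bool) : Decidable (Spec_primary_stages_completed_py results num_stages out) := by unfold Spec_primary_stages_completed_py; infer_instance

-- ===== CLAIM (what is proved, stated in full; the proofs are below) =====
def Claim_equal_primary_stages_completed_py : Prop := ∀ (results : List (List (String × String))) (num_stages : Int), Dom_primary_stages_completed_py results num_stages → Spec_primary_stages_completed_py results num_stages (primary_stages_completed_py results num_stages)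

-- ===== LEMMAS AND PROOFS =====

-- the stage name required for index i
def pvKey (i : Int) : String := "Stage " ++ PySem.Int.toStr i

-- last result whose "stage" entry is s (the last-wins winner both programs keep)
def pvLast (results : List (List (String × String))) (s : String) :
    Option (List (String × String)) :=
  results.foldl (fun acc res => if pvDGet res "stage" = some s then some res else acc) none

lemma pvExpectedA_eq (n : Int) :
    pvExpectedA n = PySem.Set.ofList ((PySem.List.pyRange 1 (n+1) 1).map pvKey) := by
  unfold pvExpectedA pvKey
  rw [← PySem.Set.update_map_eq_foldl_add, PySem.Set.update_empty]

lemma mem_expectedA (n : Int) (s : String) :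
    s ∈ pvExpectedA n ↔ ∃ i ∈ PySem.List.pyRange 1 (n+1) 1, pvKey i = s := by
  rw [pvExpectedA_eq, PySem.Set.mem_ofList, List.mem_map]

-- A's dict lookup at an expected stage is the last-wins fold
lemma completedA_get (l : List (List (String × String))) (E : PySem.Set String)
    (d : PySem.Dict String (List (String × String))) (s : String) (hs : s ∈ E) :
    (l.foldl (fun d res =>
        match pvDGet res "stage" with
        | some u => if PySem.Set.contains E u then d.insert u res else d
        | none => d) d).get? s
      = l.foldl (fun acc res => if pvDGet res "stage" = some s then some res else acc) (d.get? s) := by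
  induction l generalizing d with
  | nil => rfl
  | cons r t ih =>
      simp only [List.foldl_cons]
      cases h : pvDGet r "stage" with
      | none => rw [ih]; simp
      | some u =>
          dsimp only
          by_cases hu : u = s
          · subst hu
            have hc : PySem.Set.contains E u = true := by
              simp only [PySem.Set.contains, List.contains_eq_mem, hs, decide_true]
            rw [if_pos hc, ih]
            simp
          · by_cases hc : PySem.Set.contains E u = true
            · rw [if_pos hc, ih]
              simp [hu, PySem.Dict.get?_insert, Ne.symm hu]
            · rw [if_neg hc, ih]; simp [hu]

lemma completedA_get_eq_last (results : List (List (String × String))) (E : PySem.Set String)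
    (s : String) (hs : s ∈ E) :
    (pvCompletedA results E).get? s = pvLast results s := by
  unfold pvCompletedA pvLast
  rw [completedA_get results E PySem.Dict.empty s hs]
  rfl

lemma completedA_keys_nodup (l : List (List (String × String))) (E : PySem.Set String)
    (d : PySem.Dict String (List (String × String))) (hd : d.keys.Nodup) :
    (l.foldl (fun d res =>
        match pvDGet res "stage" with
        | some u => if PySem.Set.contains E u then d.insert u res else d
        | none => d) d).keys.Nodup := by
  induction l generalizing d with
  | nil => exact hd
  | cons r t ih =>
      simp only [List.foldl_cons]
      cases h : pvDGet r "stage" with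
      | none => exact ih d hd
      | some u =>
          dsimp only
          by_cases hc : PySem.Set.contains E u = true
          · rw [if_pos hc]; exact ih _ (PySem.Dict.nodup_keys_insert d u r hd)
          · rw [if_neg hc]; exact ih d hd

lemma completedA_keys_sub (l : List (List (String × String))) (E : PySem.Set String)
    (d : PySem.Dict String (List (String × String))) (hd : ∀ k ∈ d.keys, k ∈ E) :
    ∀ k ∈ (l.foldl (fun d res =>
        match pvDGet res "stage" with
        | some u => if PySem.Set.contains E u then d.insert u res else d
        | none => d) d).keys, k ∈ E := by
  induction l generalizing d with
  | nil => exact hd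
  | cons r t ih =>
      simp only [List.foldl_cons]
      cases h : pvDGet r "stage" with
      | none => exact ih d hd
      | some u =>
          dsimp only
          by_cases hc : PySem.Set.contains E u = true
          · rw [if_pos hc]
            refine ih _ ?_
            intro k hk
            rcases (PySem.Dict.mem_keys_insert d u k r).mp hk with rfl | hk
            · simpa [PySem.Set.contains, List.contains_eq_mem] using hc
            · exact hd k hk
          · rw [if_neg hc]; exact ih d hd

lemma mem_keys_iff_isSome (d : PySem.Dict String (List (String × String))) (k : String) :
    k ∈ d.keys ↔ (d.get? k).isSome := by
  rw [← PySem.Dict.contains_iff_mem_keys, PySem.Dict.contains_eq_isSome_get?]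

lemma A_true_iff (results : List (List (String × String))) (n : Int) :
    primary_stages_completed_py results n = true ↔
      ∀ s ∈ pvExpectedA n,
        (pvLast results s).map (fun r => pvDGet r "status") = some (some "ok") := by
  set E := pvExpectedA n with hEdef
  set C := pvCompletedA results E with hCdef
  have hnd : C.keys.Nodup := completedA_keys_nodup results E PySem.Dict.empty (by simp)
  have hsub : ∀ k ∈ C.keys, k ∈ E := completedA_keys_sub results E PySem.Dict.empty (by simp)
  have hE : E.Nodup := by rw [hEdef, pvExpectedA_eq]; exact PySem.Set.nodup_ofList _
  have hsize : PySem.Dict.size C = C.keys.length := by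
    simp [PySem.Dict.size, PySem.Dict.keys]
  have hget : ∀ s ∈ E, C.get? s = pvLast results s := fun s hs =>
    completedA_get_eq_last results E s hs
  unfold primary_stages_completed_py
  show (if PySem.Dict.size C ≠ E.length then false
      else C.values.all (fun res => pvDGet res "status" == some "ok")) = true ↔ _
  by_cases hlen : PySem.Dict.size C = E.length
  · rw [if_neg (show ¬(PySem.Dict.size C ≠ E.length) from fun hcon => hcon hlen)]
    have hperm : C.keys.Perm E :=
      (List.subperm_of_subset hnd hsub).perm_of_length_le (by omega)
    rw [PySem.Dict.values_eq_map_keys C hnd [], List.all_eq_true]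
    constructor
    · intro hall s hs
      have hk : s ∈ C.keys := hperm.mem_iff.mpr hs
      have h1 : (C.get? s).isSome := (mem_keys_iff_isSome C s).mp hk
      rcases Option.isSome_iff_exists.mp h1 with ⟨r, hr⟩
      have hstat := hall (C.getD s []) (List.mem_map.mpr ⟨s, hk, rfl⟩)
      rw [PySem.Dict.getD_of_get?_eq_some C [] hr] at hstat
      rw [← hget s hs, hr]
      simpa using hstat
    · intro hP x hx
      rcases List.mem_map.mp hx with ⟨s, hk, rfl⟩
      have hs : s ∈ E := hsub s hk
      have := hP s hs
      rw [← hget s hs] at this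
      rcases Option.map_eq_some_iff.mp this with ⟨r, hr, hok⟩
      rw [PySem.Dict.getD_of_get?_eq_some C [] hr]
      simpa using hok
  · rw [if_pos hlen]
    simp only [Bool.false_eq_true, false_iff]
    intro hP
    apply hlen
    have hEsub : E ⊆ C.keys := by
      intro s hs
      have := hP s hs
      rw [← hget s hs] at this
      rcases Option.map_eq_some_iff.mp this with ⟨r, hr, _⟩
      exact (mem_keys_iff_isSome C s).mpr (by simp [hr])
    have h1 := (List.subperm_of_subset hnd hsub).length_le
    have h2 := (List.subperm_of_subset hE hEsub).length_le
    omega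

-- B's first match in the reversed list is the same last-wins fold
lemma foldl_last_eq_find (l : List (List (String × String))) (s : String)
    (o : Option (List (String × String))) :
    l.foldl (fun acc res => if pvDGet res "stage" = some s then some res else acc) o
      = (l.reverse.find? (fun res => pvDGet res "stage" == some s)).or o := by
  induction l generalizing o with
  | nil => rfl
  | cons r t ih =>
      simp only [List.foldl_cons, List.reverse_cons, List.find?_append, ih]
      cases h : t.reverse.find? (fun res => pvDGet res "stage" == some s) with
      | some x => simp
      | none =>
          by_cases hr : pvDGet r "stage" = some s
          · have hb : (pvDGet r "stage" == some s) = true := by simp [hr]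
            simp [List.find?, hb, hr]
          · have hb : (pvDGet r "stage" == some s) = false := by simp [hr]
            simp [List.find?, hb, hr]

lemma pvLast_eq_find (results : List (List (String × String))) (s : String) :
    pvLast results s
      = results.reverse.find? (fun res => pvDGet res "stage" == some s) := by
  unfold pvLast
  rw [foldl_last_eq_find]
  simp

lemma B_true_iff (results : List (List (String × String))) (n : Int) :
    primary_stages_completed_py_alt results n = true ↔
      ∀ i ∈ PySem.List.pyRange 1 (n+1) 1,
        (pvLast results (pvKey i)).map (fun r => pvDGet r "status") = some (some "ok") := by
  unfold primary_stages_completed_py_alt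
  rw [List.all_eq_true]
  refine forall₂_congr (fun i hi => ?_)
  show (match results.reverse.find? (fun res => pvDGet res "stage" == some (pvKey i)) with
    | some r => pvDGet r "status" == some "ok"
    | none => false) = true ↔ _
  rw [← pvLast_eq_find]
  cases h : pvLast results (pvKey i) with
  | none => simp
  | some r => simp

-- ===== VERDICT (by name: the statement is the Claim_ definition above) =====
theorem primary_stages_completed_py_spec : Claim_equal_primary_stages_completed_py := by
  intro results n _
  unfold Spec_primary_stages_completed_py
  rw [Bool.eq_iff_iff, A_true_iff, B_true_iff]
  constructor
  · intro h i hi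
    exact h (pvKey i) ((mem_expectedA n (pvKey i)).mpr ⟨i, hi, rfl⟩)
  · intro h s hs
    rcases (mem_expectedA n s).mp hs with ⟨i, hi, rfl⟩
    exact h i hi
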